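-- pv_equiv track=rewrite | github.com/Pitt-JonesLab/DWMsimulator | ArithmaticOperation.py | shifted_by_one
-- ===== SOURCE A (Python) =====
-- def shifted_by_one(data, bit_length):
--
--     shifted_A = [[('0') for _ in range(bit_length)] for _ in range(bit_length)]
--     output = data
--
--     for i in range(0,bit_length):
--         # call  function to shift data by 1
--         output = shift(output)
--         for j in range(0, bit_length):
--             shifted_A[i][j] = output[j]
--
--
--     return shifted_A
--
-- def shift(data):
--     bit_length = len(data)
--     # Logical shift
--     n = 1
--     output = [0] * bit_length
--
--     count = 0
--     for i in range(n, bit_length):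
--         output[count] = data[i]
--         count += 1
--
--     for i in range(count, bit_length):
--         output[i] = '0'
--
--     return output
-- ===== SOURCE B (Python) =====
-- def shifted_by_one(data, bit_length):
--     # Row i is data shifted left i+1 times: a slice plus zero padding, truncated
--     # to bit_length columns.  No shift() helper, no repeated-shift accumulator.
--     return [(list(data[i + 1:]) + ['0'] * (i + 1))[:bit_length]
--             for i in range(bit_length)]
-- ===== Notes on version B (the rewrite author's own statement) =====
-- stated objective: simpler
-- what changed: Replaced the shift() helper, the repeated-shift accumulator and the preallocated mutated matrix with a single comprehension that builds each row directly as a slice data[i+1:] plus '0'-padding, truncated to bit_length columns.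
import Mathlib
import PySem

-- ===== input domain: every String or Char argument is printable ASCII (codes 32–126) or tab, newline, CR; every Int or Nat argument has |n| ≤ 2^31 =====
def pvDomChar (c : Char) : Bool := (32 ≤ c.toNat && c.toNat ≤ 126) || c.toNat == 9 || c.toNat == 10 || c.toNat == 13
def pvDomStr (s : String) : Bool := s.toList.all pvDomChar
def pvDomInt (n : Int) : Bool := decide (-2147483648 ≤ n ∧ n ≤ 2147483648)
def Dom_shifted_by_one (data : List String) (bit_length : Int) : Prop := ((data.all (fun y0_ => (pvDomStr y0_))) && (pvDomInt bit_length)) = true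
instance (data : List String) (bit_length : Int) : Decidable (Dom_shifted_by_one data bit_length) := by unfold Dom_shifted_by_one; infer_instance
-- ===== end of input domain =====

-- B builds each row directly as the slice data[i+1:] plus '0'-padding truncated to
-- bit_length columns, replacing A's shift() helper, repeated-shift accumulator and
-- preallocated mutated matrix (objective: simpler; not claimed faster).

-- ===== PORT A =====
-- shift(data): the Python inits output = [0]*bit_length with int 0 placeholders
-- that are all overwritten before the return; we use "0" as the placeholder.
def shift_py (data : List String) : List String :=
  let bit_length : Int := PySem.List.len data
  let output : List String := List.replicate bit_length.toNat "0"
  let s := (PySem.List.pyRange 1 bit_length 1).foldl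
    (fun (s : List String × Int) i =>
      (PySem.List.pySetD s.1 s.2 (PySem.List.pyGetD data i ""), s.2 + 1))
    (output, 0)
  (PySem.List.pyRange s.2 bit_length 1).foldl
    (fun o i => PySem.List.pySetD o i "0") s.1

def shifted_by_one (data : List String) (bit_length : Int) : List (List String) :=
  let shifted_A : List (List String) :=
    (PySem.List.pyRange 0 bit_length 1).map (fun _ =>
      (PySem.List.pyRange 0 bit_length 1).map (fun _ => "0"))
  let s := (PySem.List.pyRange 0 bit_length 1).foldl
    (fun (s : List (List String) × List String) i =>
      let output := shift_py s.2
      let A := (PySem.List.pyRange 0 bit_length 1).foldl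
        (fun A j =>
          PySem.List.pySetD A i
            (PySem.List.pySetD (PySem.List.pyGetD A i []) j
              (PySem.List.pyGetD output j "")))
        s.1
      (A, output))
    (shifted_A, data)
  s.1

-- ===== PORT B =====
def shifted_by_one_alt (data : List String) (bit_length : Int) : List (List String) :=
  (PySem.List.pyRange 0 bit_length 1).map (fun i =>
    PySem.List.slice
      (PySem.List.slice data (some (i + 1)) none ++ List.replicate (i + 1).toNat "0")
      none (some bit_length))

-- ===== PRECONDITION & SPEC =====
-- Pre_ excludes exactly the inputs where A raises IndexError: a positive
-- bit_length larger than len(data) makes output[j] index past the shifted list.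
def Pre_shifted_by_one (data : List String) (bit_length : Int) : Prop :=
  bit_length ≤ (data.length : Int) ∨ bit_length ≤ 0
instance (data : List String) (bit_length : Int) : Decidable (Pre_shifted_by_one data bit_length) := by unfold Pre_shifted_by_one; infer_instance

def pvWitness_shifted_by_one : List String × Int := (["1", "0", "1"], 3)

def Spec_shifted_by_one (data : List String) (bit_length : Int) (out : List (List String)) : Prop := out = shifted_by_one_alt data bit_length
instance (data : List String) (bit_length : Int) (out : List (List String)) : Decidable (Spec_shifted_by_one data bit_length out) := by unfold Spec_shifted_by_one; infer_instance

-- ===== CLAIM (what is proved, stated in full; the proofs are below) =====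
def Claim_equal_shifted_by_one : Prop := ∀ (data : List String) (bit_length : Int), Dom_shifted_by_one data bit_length → Pre_shifted_by_one data bit_length → Spec_shifted_by_one data bit_length (shifted_by_one data bit_length)

-- ===== LEMMAS AND PROOFS =====

-- data shifted left k times: drop k elements, pad with k '0's (length preserved).
def rowFull (data : List String) (k : Nat) : List String :=
  data.drop k ++ List.replicate k "0"

lemma pyRange_nat (n : Nat) : PySem.List.pyRange 0 (n:Int) 1 = (List.range n).map (fun (k : Nat) => (k:Int)) := by
  rw [PySem.List.pyRange_one]; simp
lemma loop1 (a : String) (t : List String) : ∀ m, m ≤ t.length →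
    ((List.range m).map (fun (k:Nat) => (1:Int)+k)).foldl
      (fun (s : List String × Int) i =>
        (PySem.List.pySetD s.1 s.2 (PySem.List.pyGetD (a::t) i ""), s.2 + 1))
      (List.replicate (t.length+1) "0", 0)
    = (t.take m ++ List.replicate (t.length + 1 - m) "0", (m:Int)) := by
  intro m hm
  induction m with
  | zero => simp
  | succ m ih =>
    rw [List.range_succ, List.map_append, List.foldl_append, ih (by omega)]
    have hm' : m < t.length := by omega
    have h1 : ((1:Int) + m) = ((m+1 : Nat) : Int) := by push_cast; ring
    simp only [List.map_cons, List.map_nil, List.foldl_cons, List.foldl_nil, h1,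
      PySem.List.pySetD_natCast, PySem.List.pyGetD_natCast]
    have htake : (t.take m).length = m := by simp [hm'.le]
    have hrep : List.replicate (t.length + 1 - m) "0" = "0" :: List.replicate (t.length - m) "0" := by
      have : t.length + 1 - m = (t.length - m) + 1 := by omega
      rw [this, List.replicate_succ]
    simp only [Prod.mk.injEq]
    constructor
    · rw [hrep, List.set_append]
      simp only [htake, lt_irrefl, if_false, Nat.sub_self, List.set_cons_zero,
        List.getD_cons_succ]
      rw [List.getD_eq_getElem t "" hm', ← List.take_append_getElem hm']
      have h2 : t.length + 1 - (m + 1) = t.length - m := by omega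
      rw [h2, List.append_assoc, List.singleton_append]
    · push_cast; ring

lemma shift_py_cons (a : String) (t : List String) :
    shift_py (a :: t) = t ++ ["0"] := by
  unfold shift_py
  simp only [PySem.List.len_eq, List.length_cons, Int.toNat_natCast]
  have hr : PySem.List.pyRange 1 ((t.length + 1 : Nat) : Int) 1
      = (List.range t.length).map (fun (k : Nat) => (1 : Int) + k) := by
    rw [PySem.List.pyRange_one]
    have : (((t.length + 1 : Nat) : Int) - 1).toNat = t.length := by omega
    rw [this]
  rw [hr, loop1 a t t.length le_rfl]
  have hb : ((t.length + 1 : Nat) : Int) = (t.length : Int) + 1 := by push_cast; ring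
  rw [hb, PySem.List.pyRange_one_singleton]
  simp only [List.foldl_cons, List.foldl_nil, PySem.List.pySetD_natCast,
    Nat.sub_self, List.take_length, List.set_append]
  simp

lemma shift_py_rowFull (data : List String) (k : Nat) (hk : k < data.length) :
    shift_py (rowFull data k) = rowFull data (k + 1) := by
  unfold rowFull
  rw [List.drop_eq_getElem_cons hk, List.cons_append, shift_py_cons,
    List.append_assoc, ← List.replicate_succ']

lemma getD_set_self (A : List (List String)) (i : Nat) (r : List String)
    (h : i < A.length) : (A.set i r).getD i [] = r := by
  simp [List.getD_eq_getElem?_getD, h]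

lemma inner_loop_aux (output : List String) (bl i : Nat) (A : List (List String))
    (hi : i < A.length) (hbl : bl ≤ output.length)
    (hrow : bl ≤ (A.getD i []).length) :
    ∀ m, m ≤ bl →
    ((List.range m).map (fun (k : Nat) => (k : Int))).foldl
      (fun A j =>
        PySem.List.pySetD A (i : Int)
          (PySem.List.pySetD (PySem.List.pyGetD A (i : Int) []) j
            (PySem.List.pyGetD output j "")))
      A
    = A.set i (output.take m ++ (A.getD i []).drop m) := by
  intro m hm
  induction m with
  | zero =>
    simp only [List.range_zero, List.map_nil, List.foldl_nil, List.take_zero,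
      List.drop_zero, List.nil_append]
    rw [List.getD_eq_getElem A [] hi, List.set_getElem_self]
  | succ m ih =>
    rw [List.range_succ, List.map_append, List.foldl_append, ih (by omega)]
    have hm' : m < bl := by omega
    have hmo : m < output.length := by omega
    simp only [List.map_cons, List.map_nil, List.foldl_cons, List.foldl_nil,
      PySem.List.pySetD_natCast, PySem.List.pyGetD_natCast]
    rw [getD_set_self _ _ _ hi, List.set_set]
    congr 1
    have htake : (output.take m).length = m := by simp [hmo.le]
    rw [List.set_append]
    simp only [htake, lt_irrefl, if_false, Nat.sub_self]
    have hr : m < (A.getD i []).length := by omega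
    rw [List.drop_eq_getElem_cons hr, List.set_cons_zero,
      List.getD_eq_getElem output "" hmo, ← List.take_append_getElem hmo,
      List.append_assoc, List.singleton_append]

lemma inner_loop (output : List String) (bl i : Nat) (A : List (List String))
    (hi : i < A.length) (hrow : (A.getD i []).length = bl) (hbl : bl ≤ output.length) :
    ((List.range bl).map (fun (k : Nat) => (k : Int))).foldl
      (fun A j =>
        PySem.List.pySetD A (i : Int)
          (PySem.List.pySetD (PySem.List.pyGetD A (i : Int) []) j
            (PySem.List.pyGetD output j "")))
      A
    = A.set i (output.take bl) := by
  rw [inner_loop_aux output bl i A hi hbl (by omega) bl le_rfl,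
    List.drop_eq_nil_of_le (by omega), List.append_nil]

lemma length_rowFull (data : List String) (k : Nat) (hk : k ≤ data.length) :
    (rowFull data k).length = data.length := by
  simp [rowFull]; omega

lemma outer_loop (data : List String) (bl : Nat) (hbl : bl ≤ data.length) :
    ∀ m, m ≤ bl →
    ((List.range m).map (fun (k : Nat) => (k : Int))).foldl
      (fun (s : List (List String) × List String) i =>
        let output := shift_py s.2
        let A := ((List.range bl).map (fun (k : Nat) => (k : Int))).foldl
          (fun A j =>
            PySem.List.pySetD A i
              (PySem.List.pySetD (PySem.List.pyGetD A i []) j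
                (PySem.List.pyGetD output j "")))
          s.1
        (A, output))
      (List.replicate bl (List.replicate bl "0"), data)
    = ((List.range m).map (fun k => (rowFull data (k + 1)).take bl)
         ++ List.replicate (bl - m) (List.replicate bl "0"),
       rowFull data m) := by
  intro m hm
  induction m with
  | zero => simp [rowFull]
  | succ m ih =>
    rw [List.range_succ, List.map_append, List.foldl_append, ih (by omega)]
    simp only [List.map_cons, List.map_nil, List.foldl_cons, List.foldl_nil]
    have hmd : m < data.length := by omega
    rw [shift_py_rowFull data m hmd]
    set P := (List.range m).map (fun k => (rowFull data (k + 1)).take bl) with hP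
    have hPlen : P.length = m := by simp [hP]
    have hAlen : (P ++ List.replicate (bl - m) (List.replicate bl "0")).length = bl := by
      simp [hPlen]; omega
    have hrep : List.replicate (bl - m) (List.replicate bl "0")
        = List.replicate bl "0" :: List.replicate (bl - (m + 1)) (List.replicate bl "0") := by
      have : bl - m = (bl - (m + 1)) + 1 := by omega
      rw [this, List.replicate_succ]
    have hgetD : ((P ++ List.replicate (bl - m) (List.replicate bl "0")).getD m [])
        = List.replicate bl "0" := by
      rw [hrep, ← hPlen]
      simp [List.getD_eq_getElem?_getD]
    rw [inner_loop (rowFull data (m + 1)) bl m _ (by omega) (by rw [hgetD]; simp)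
      (by rw [length_rowFull data (m + 1) (by omega)]; omega)]
    rw [List.set_append]
    simp only [hPlen, lt_irrefl, if_false, Nat.sub_self, hrep, List.set_cons_zero]
    simp [List.append_assoc]
    exact hP

lemma alt_eq (data : List String) (bl : Nat) :
    shifted_by_one_alt data (bl : Int)
      = (List.range bl).map (fun k => (rowFull data (k + 1)).take bl) := by
  unfold shifted_by_one_alt
  rw [pyRange_nat, List.map_map]
  apply List.map_congr_left
  intro k _
  have h1 : ((k : Int) + 1) = ((k + 1 : Nat) : Int) := by push_cast; ring
  simp only [Function.comp, h1, PySem.List.slice_from_natCast,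
    PySem.List.slice_to_natCast, Int.toNat_natCast]
  rfl

-- ===== VERDICT (by name: the statement is the Claim_ definition above) =====
theorem shifted_by_one_spec : Claim_equal_shifted_by_one := by
  intro data bit_length _ hpre
  unfold Spec_shifted_by_one
  unfold Pre_shifted_by_one at hpre
  by_cases hb : bit_length ≤ 0
  · simp [shifted_by_one, shifted_by_one_alt, PySem.List.pyRange_one_eq_nil hb]
  · have hbl : bit_length = ((bit_length.toNat : Nat) : Int) := by omega
    set bl : Nat := bit_length.toNat with hbldef
    have hlen : bl ≤ data.length := by omega
    rw [hbl, alt_eq]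
    unfold shifted_by_one
    simp only [pyRange_nat]
    have hinit : ((List.range bl).map (fun (k : Nat) => (k : Int))).map
          (fun _ => ((List.range bl).map (fun (k : Nat) => (k : Int))).map (fun _ => "0"))
        = List.replicate bl (List.replicate bl "0") := by
      simp only [List.map_map, Function.comp_def]
      simp [List.map_const']
    rw [hinit, outer_loop data bl hlen bl le_rfl]
    simp
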